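-- pv_equiv track=rewrite | github.com/getsentry/sentry | src/sentry/snuba/metrics/extraction.py | _escape_wildcard
-- ===== SOURCE A (Python) =====
-- def _escape_wildcard(value: str) -> str:
--     """
--     Escapes all characters in the wildcard which are considered as meta characters in the glob
--     implementation in Relay, which can be found at: https://docs.rs/globset/latest/globset/#syntax.
--
--     The goal of this function is to only preserve the `*` character as it is the only character that Sentry's
--     product offers to users to perform wildcard matching.
--     """
--     i, n = 0, len(value)
--     escaped = ""
--
--     while i < n:
--         c = value[i]
--         i = i + 1
--
--         if c in "[]{}?":
--             escaped += rf"\{c}"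
--         else:
--             escaped += c
--
--     return escaped
-- ===== SOURCE B (Python) =====
-- def _escape_wildcard(value: str) -> str:
--     """
--     Escapes glob meta characters ([]{}?) so that only `*` keeps its wildcard
--     meaning, by running one str.replace pass per meta character.  Correct
--     because the escape character `\\` is not itself in the escape set, so the
--     staged passes cannot interfere with each other.
--     """
--     for ch in "[]{}?":
--         value = value.replace(ch, "\\" + ch)
--     return value
-- ===== Notes on version B (the rewrite author's own statement) =====
-- stated objective: faster
-- what changed: Replaces the indexed while loop with per-character branching and repeated string concatenation by five staged str.replace passes, one per meta character; correct because the backslash is not in the escape set so passes cannot interfere.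
import Mathlib
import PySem

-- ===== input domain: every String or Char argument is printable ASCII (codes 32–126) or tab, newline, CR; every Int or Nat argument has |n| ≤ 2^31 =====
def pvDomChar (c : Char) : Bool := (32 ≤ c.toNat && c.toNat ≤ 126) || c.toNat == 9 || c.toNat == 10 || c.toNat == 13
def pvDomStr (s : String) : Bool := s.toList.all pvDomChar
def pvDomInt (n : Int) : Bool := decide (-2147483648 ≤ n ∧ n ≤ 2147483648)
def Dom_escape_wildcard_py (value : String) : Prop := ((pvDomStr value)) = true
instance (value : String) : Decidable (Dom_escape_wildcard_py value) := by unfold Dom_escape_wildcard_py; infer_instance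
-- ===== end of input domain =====

-- B replaces A's indexed while loop (per-character branching, repeated
-- concatenation) by five staged str.replace passes, one per meta character; the
-- backslash is not in the escape set, so the passes cannot interfere (the timing
-- run measured B faster).

-- ===== PORT A =====
-- the while loop: i, escaped are the loop state; c = value[i] via pyGet?
def pvEscLoopA (s : List Char) (n i : Nat) (escaped : List Char) : List Char :=
  if _h : i < n then
    match PySem.List.pyGet? s (i : Int) with
    | some c =>
        pvEscLoopA s n (i + 1)
          (if c ∈ "[]{}?".toList then escaped ++ ['\\', c] else escaped ++ [c])
    | none => escaped
  else escaped
termination_by n - i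

def escape_wildcard_py (value : String) : String :=
  String.ofList (pvEscLoopA value.toList value.toList.length 0 [])

-- ===== PORT B =====
-- for ch in "[]{}?": value = value.replace(ch, "\" + ch)
def escape_wildcard_py_alt (value : String) : String :=
  "[]{}?".toList.foldl
    (fun acc ch => PySem.Str.replace acc (String.ofList [ch]) (String.ofList ['\\', ch]))
    value

-- ===== PRECONDITION & SPEC =====
def Spec_escape_wildcard_py (value : String) (out : String) : Prop := out = escape_wildcard_py_alt value
instance (value : String) (out : String) : Decidable (Spec_escape_wildcard_py value out) := by unfold Spec_escape_wildcard_py; infer_instance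

-- ===== CLAIM (what is proved, stated in full; the proofs are below) =====
def Claim_equal_escape_wildcard_py : Prop := ∀ (value : String), Dom_escape_wildcard_py value → Spec_escape_wildcard_py value (escape_wildcard_py value)

-- ===== LEMMAS AND PROOFS =====

-- escaping relative to a set of already-processed meta characters
def pvEsc (ms : List Char) (x : Char) : List Char :=
  if x ∈ ms then ['\\', x] else [x]

-- str.replace with a single-character pattern is a character-wise flatMap
theorem pvReplaceGo_single (c : Char) (new : List Char) :
    ∀ fuel l acc, l.length ≤ fuel →
      PySem.Chars.replace.go [c] new fuel l acc =
        acc.reverse ++ l.flatMap (fun x => if x = c then new else [x]) := by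
  intro fuel
  induction fuel with
  | zero =>
    intro l acc h
    have : l = [] := List.eq_nil_of_length_eq_zero (by omega)
    subst this
    simp [PySem.Chars.replace.go]
  | succ k ih =>
    intro l acc h
    cases l with
    | nil => simp [PySem.Chars.replace.go]
    | cons c' t =>
      rw [PySem.Chars.replace.go]
      by_cases hc : c' = c
      · subst hc
        have hpre : List.isPrefixOf [c'] (c' :: t) = true := by
          simp [List.isPrefixOf]
        rw [if_pos hpre]
        rw [show List.drop ([c'] : List Char).length (c' :: t) = t from rfl]
        simp only [List.length_cons] at h
        rw [ih t (new.reverse ++ acc) (by omega)]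
        simp
      · have hpre : List.isPrefixOf [c] (c' :: t) = false := by
          simp only [List.isPrefixOf, Bool.and_true,
            beq_eq_false_iff_ne]
          exact fun h => hc h.symm
        rw [hpre]
        simp only [List.length_cons] at h
        rw [ih t (c' :: acc) (by omega)]
        simp [hc]

theorem pvReplace_single (l : List Char) (c : Char) (new : List Char) :
    PySem.Chars.replace l [c] new =
      l.flatMap (fun x => if x = c then new else [x]) := by
  rw [PySem.Chars.replace]
  simp only [List.isEmpty_cons, Bool.false_eq_true, if_false]
  simpa using pvReplaceGo_single c new l.length l [] (le_refl _)

-- one staged pass on an already partially escaped string extends the escape set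
theorem pvReplace_step (s : List Char) (done : List Char) (c : Char)
    (hc : c ∉ done) (hb : c ≠ '\\') :
    PySem.Chars.replace (s.flatMap (pvEsc done)) [c] ['\\', c] =
      s.flatMap (pvEsc (done ++ [c])) := by
  rw [pvReplace_single]
  induction s with
  | nil => simp
  | cons x xs ih =>
    simp only [List.flatMap_cons, List.flatMap_append, ih]
    congr 1
    by_cases hx : x ∈ done
    · have hxc : x ≠ c := fun h => hc (h ▸ hx)
      simp [pvEsc, hx, hxc, Ne.symm hb]
    · by_cases hxc : x = c
      · subst hxc
        simp [pvEsc, hx]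
      · simp [pvEsc, hx, hxc]

-- the whole B fold, by induction on the remaining meta characters
theorem pvFoldB_eq (rest : List Char) :
    ∀ (done s : List Char), rest.Nodup → (∀ c ∈ rest, c ∉ done) → '\\' ∉ rest →
      rest.foldl
        (fun acc ch => PySem.Chars.replace acc [ch] ['\\', ch])
        (s.flatMap (pvEsc done)) =
      s.flatMap (pvEsc (done ++ rest)) := by
  induction rest with
  | nil => intro done s _ _ _; simp
  | cons c rest' ih =>
    intro done s hnd hdj hb
    simp only [List.foldl_cons]
    rw [pvReplace_step s done c (hdj c (by simp)) (fun h => hb (by simp [h]))]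
    rw [ih (done ++ [c]) s (List.Nodup.of_cons hnd)
        (fun x hx => by
          simp only [List.mem_append, List.mem_singleton]
          rintro (h | h)
          · exact hdj x (by simp [hx]) h
          · subst h; exact (List.nodup_cons.mp hnd).1 hx)
        (fun h => hb (by simp [h]))]
    simp

-- A's loop produces the same character-wise flatMap
theorem pvEscLoopA_eq (s : List Char) :
    ∀ i esc, i ≤ s.length →
      pvEscLoopA s s.length i esc = esc ++ (s.drop i).flatMap (pvEsc "[]{}?".toList) := by
  intro i
  induction hn : s.length - i generalizing i with
  | zero =>
    intro esc hi
    have hle : s.length ≤ i := by omega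
    rw [pvEscLoopA]
    simp [List.drop_of_length_le hle, show ¬ i < s.length by omega]
  | succ k ih =>
    intro esc hi
    have hlt : i < s.length := by omega
    rw [pvEscLoopA]
    have hget : PySem.List.pyGet? s (i : Int) = some s[i] :=
      PySem.List.pyGet?_ofNat s i hlt
    simp only [hlt, dif_pos, hget]
    rw [ih (i + 1) (by omega) _ (by omega)]
    rw [List.drop_eq_getElem_cons hlt, List.flatMap_cons]
    unfold pvEsc
    by_cases hc : s[i] ∈ "[]{}?".toList <;> simp_all

-- move B's String fold to the List side
theorem pvFoldB_toList (ms : List Char) :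
    ∀ v : String,
      (ms.foldl
        (fun acc ch => PySem.Str.replace acc (String.ofList [ch]) (String.ofList ['\\', ch]))
        v).toList =
      ms.foldl (fun acc ch => PySem.Chars.replace acc [ch] ['\\', ch]) v.toList := by
  induction ms with
  | nil => intro v; rfl
  | cons c ms' ih =>
    intro v
    simp only [List.foldl_cons]
    rw [ih]
    congr 1
    rw [PySem.Str.toList_replace]
    simp

-- ===== VERDICT (by name: the statement is the Claim_ definition above) =====
theorem escape_wildcard_py_spec : Claim_equal_escape_wildcard_py := by
  intro value _
  unfold Spec_escape_wildcard_py escape_wildcard_py escape_wildcard_py_alt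
  apply String.ext        -- compare via toList
  rw [String.toList_ofList, pvFoldB_toList]
  rw [pvEscLoopA_eq value.toList 0 [] (by omega)]
  have hrepr : value.toList = value.toList.flatMap (pvEsc []) := by
    rw [show pvEsc [] = fun x => [x] from funext fun x => by simp [pvEsc]]
    simp
  conv_rhs => rw [hrepr] -- seed the fold invariant with the empty escape set
  rw [pvFoldB_eq "[]{}?".toList [] value.toList (by decide) (by simp) (by decide)]
  rfl
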